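-- pv_equiv track=rewrite | github.com/KomMonitor/processes-api | processor/process/pykmhelper.py | applyComputationFilter_onValueArray
-- ===== SOURCE A (Python) =====
-- def applyComputationFilter_onValueArray(valueArray, computationFilterOperator, computationFilterPropertyValue):
--     """applys a computation filter to a submitted value array and returns the filtered Array. Several filter operators are valid.
--
--     Args:
--         valueArray (Array): the array for which the filter shall be applied
--         computationFilterOperator (string): the operator which shall be used to filter the array. Valid entrys are Equal, Greater_than, Greater_than_or_equal, Less_than, Less_than_or_equal, Unequal, Contains, Range
--         computationFilterPropertyValue (string): the filter value
--
--     Returns: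
--         Array | None: returns the filtered Array or None if the wrong computation filter is used. None value has to be handeld separately in the script.
--     """
--     filteredArray = []
--
--     if computationFilterOperator == "Equal":
--         filteredArray = filter(lambda x: x == computationFilterPropertyValue, valueArray)
--     elif computationFilterOperator == "Greater_than":
--         filteredArray = filter(lambda x: x > computationFilterPropertyValue, valueArray)
--     elif computationFilterOperator == "Greater_than_or_equal":
--         filteredArray = filter(lambda x: x >= computationFilterPropertyValue, valueArray)
--     elif computationFilterOperator == "Less_than":
--         filteredArray = filter(lambda x: x < computationFilterPropertyValue, valueArray)
--     elif computationFilterOperator == "Less_than_or_equal":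
--         filteredArray = filter(lambda x: x <= computationFilterPropertyValue, valueArray)
--     elif computationFilterOperator == "Unequal":
--         filteredArray = filter(lambda x: x != computationFilterPropertyValue, valueArray)
--     elif computationFilterOperator == "Contains":
--         computationFilterPropertyValueArray = computationFilterPropertyValue.split(",")
--
--         for trimmed_element in (element.strip() for element in computationFilterPropertyValueArray):
--             tmp = [item for item in valueArray if item == trimmed_element]
--             filteredArray.extend(tmp)
--     elif computationFilterOperator == "Range":
--         computationFilterPropertyValueArray = computationFilterPropertyValue.split("-")
--         computationFilterPropertyValueArray = map(lambda x: int(x), computationFilterPropertyValueArray)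
--
--         filteredArray = filter(lambda x: x >= computationFilterPropertyValueArray[0] and x < computationFilterPropertyValueArray[1])
--     else:
--         return None
--
--     return filteredArray
-- ===== SOURCE B (Python) =====
-- def applyComputationFilter_onValueArray(valueArray, computationFilterOperator, computationFilterPropertyValue):
--     """Dispatch-table + counting-dict re-implementation of the same filter."""
--     comparators = {
--         "Equal": lambda x, v: x == v,
--         "Greater_than": lambda x, v: x > v,
--         "Greater_than_or_equal": lambda x, v: x >= v,
--         "Less_than": lambda x, v: x < v,
--         "Less_than_or_equal": lambda x, v: x <= v,
--         "Unequal": lambda x, v: x != v,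
--     }
--     cmp = comparators.get(computationFilterOperator)
--     if cmp is not None:
--         return [x for x in valueArray if cmp(x, computationFilterPropertyValue)]
--     if computationFilterOperator == "Contains":
--         counts = {}
--         for item in valueArray:
--             counts[item] = counts.get(item, 0) + 1
--         result = []
--         for element in computationFilterPropertyValue.split(","):
--             e = element.strip()
--             result.extend([e] * counts.get(e, 0))
--         return result
--     return None
-- ===== Notes on version B (the rewrite author's own statement) =====
-- stated objective: alternative
-- what changed: Replaces the if/elif chain by a comparator dispatch table and replaces the Contains branch's per-filter-element rescans of valueArray by one counting pass plus replication per trimmed filter element.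
import Mathlib
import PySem

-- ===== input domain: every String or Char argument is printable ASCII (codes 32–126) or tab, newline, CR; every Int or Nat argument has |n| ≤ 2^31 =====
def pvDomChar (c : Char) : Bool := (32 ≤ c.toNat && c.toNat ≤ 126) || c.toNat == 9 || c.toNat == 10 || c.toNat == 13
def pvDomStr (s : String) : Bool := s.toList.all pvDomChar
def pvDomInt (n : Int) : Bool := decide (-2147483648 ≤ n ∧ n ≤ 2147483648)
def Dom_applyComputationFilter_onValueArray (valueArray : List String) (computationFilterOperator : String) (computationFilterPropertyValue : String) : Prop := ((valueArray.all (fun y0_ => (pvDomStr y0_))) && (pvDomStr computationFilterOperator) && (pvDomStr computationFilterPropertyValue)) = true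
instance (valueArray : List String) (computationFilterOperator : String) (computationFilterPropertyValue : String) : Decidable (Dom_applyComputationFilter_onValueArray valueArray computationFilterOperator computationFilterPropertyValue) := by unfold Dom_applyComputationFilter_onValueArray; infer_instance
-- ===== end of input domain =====

-- B replaces the if/elif chain by a comparator dispatch table and the Contains branch's
-- per-filter-element rescans of valueArray by one counting pass plus per-element replication
-- (objective: alternative decomposition; measured cost comparable). Equality is about the RETURN value; neither version mutates its arguments.

-- ===== PORT A =====
-- A's comparison branches return lazy `filter` objects; the observed return value is their
-- list of elements, ported as the filtered list. A's "Range" branch always raises TypeError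
-- (filter called with one argument) and is excluded by Pre_; the port returns none there.
def applyComputationFilter_onValueArray (valueArray : List String) (computationFilterOperator : String) (computationFilterPropertyValue : String) : Option (List String) :=
  if computationFilterOperator == "Equal" then
    some (valueArray.filter (fun x => x == computationFilterPropertyValue))
  else if computationFilterOperator == "Greater_than" then
    some (valueArray.filter (fun x => decide (computationFilterPropertyValue < x)))
  else if computationFilterOperator == "Greater_than_or_equal" then
    some (valueArray.filter (fun x => decide (computationFilterPropertyValue ≤ x)))
  else if computationFilterOperator == "Less_than" then
    some (valueArray.filter (fun x => decide (x < computationFilterPropertyValue)))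
  else if computationFilterOperator == "Less_than_or_equal" then
    some (valueArray.filter (fun x => decide (x ≤ computationFilterPropertyValue)))
  else if computationFilterOperator == "Unequal" then
    some (valueArray.filter (fun x => x != computationFilterPropertyValue))
  else if computationFilterOperator == "Contains" then
    let parts := ((PySem.Str.split? computationFilterPropertyValue ",").getD []).map PySem.Str.strip
    some (parts.foldl (fun acc e => acc ++ valueArray.filter (fun item => item == e)) [])
  else if computationFilterOperator == "Range" then
    none  -- Python raises TypeError here; excluded by Pre_
  else
    none

-- ===== PORT B =====
-- Source B's dict of comparator lambdas, ported as an association list (lookup = first match)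
def pvComparators : List (String × (String → String → Bool)) :=
  [("Equal", fun x v => x == v),
   ("Greater_than", fun x v => decide (v < x)),
   ("Greater_than_or_equal", fun x v => decide (v ≤ x)),
   ("Less_than", fun x v => decide (x < v)),
   ("Less_than_or_equal", fun x v => decide (x ≤ v)),
   ("Unequal", fun x v => x != v)]

def applyComputationFilter_onValueArray_alt (valueArray : List String) (computationFilterOperator : String) (computationFilterPropertyValue : String) : Option (List String) :=
  match pvComparators.lookup computationFilterOperator with
  | some cmp => some (valueArray.filter (fun x => cmp x computationFilterPropertyValue))
  | none =>
    if computationFilterOperator == "Contains" then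
      let counts : PySem.Dict String Int :=
        valueArray.foldl (fun d item => d.insert item (d.getD item 0 + 1)) PySem.Dict.empty
      some ((((PySem.Str.split? computationFilterPropertyValue ",").getD []).map PySem.Str.strip).foldl
        (fun acc e => acc ++ List.replicate (counts.getD e 0).toNat e) [])
    else
      none

-- ===== PRECONDITION & SPEC =====
-- Pre_ excludes exactly operator "Range", on which A raises TypeError (filter called with one argument).
def Pre_applyComputationFilter_onValueArray (valueArray : List String) (computationFilterOperator : String) (computationFilterPropertyValue : String) : Prop :=
  computationFilterOperator ≠ "Range"
instance (valueArray : List String) (computationFilterOperator : String) (computationFilterPropertyValue : String) : Decidable (Pre_applyComputationFilter_onValueArray valueArray computationFilterOperator computationFilterPropertyValue) := by unfold Pre_applyComputationFilter_onValueArray; infer_instance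

def pvWitness_applyComputationFilter_onValueArray : List String × String × String := (["a", "b", "a"], "Contains", " a ,b")

def Spec_applyComputationFilter_onValueArray (valueArray : List String) (computationFilterOperator : String) (computationFilterPropertyValue : String) (out : Option (List String)) : Prop := out = applyComputationFilter_onValueArray_alt valueArray computationFilterOperator computationFilterPropertyValue
instance (valueArray : List String) (computationFilterOperator : String) (computationFilterPropertyValue : String) (out : Option (List String)) : Decidable (Spec_applyComputationFilter_onValueArray valueArray computationFilterOperator computationFilterPropertyValue out) := by unfold Spec_applyComputationFilter_onValueArray; infer_instance

-- ===== CLAIM (what is proved, stated in full; the proofs are below) =====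
def Claim_equal_applyComputationFilter_onValueArray : Prop := ∀ (valueArray : List String) (computationFilterOperator : String) (computationFilterPropertyValue : String), Dom_applyComputationFilter_onValueArray valueArray computationFilterOperator computationFilterPropertyValue → Pre_applyComputationFilter_onValueArray valueArray computationFilterOperator computationFilterPropertyValue → Spec_applyComputationFilter_onValueArray valueArray computationFilterOperator computationFilterPropertyValue (applyComputationFilter_onValueArray valueArray computationFilterOperator computationFilterPropertyValue)


-- ===== LEMMAS AND PROOFS =====

-- B's counting loop computes occurrence counts: invariant over the fold, generalised in the accumulator
theorem pvCountsLoop_getD (xs : List String) (d : PySem.Dict String Int) (v : String) :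
    (xs.foldl (fun d item => d.insert item (d.getD item 0 + 1)) d).getD v 0
      = d.getD v 0 + xs.count v := by
  induction xs generalizing d with
  | nil => simp
  | cons x xs ih =>
    rw [List.foldl_cons, ih, List.count_cons]
    by_cases hx : x = v
    · subst hx; simp; omega
    · simp [PySem.Dict.getD_insert, hx, Ne.symm hx]

-- A's rescan of valueArray for one trimmed element equals B's replication from the counting dict
theorem pvFilter_eq_replicate (valueArray : List String) (e : String) :
    valueArray.filter (fun item => item == e)
      = List.replicate ((valueArray.foldl (fun d item => d.insert item (d.getD item 0 + 1))
          (PySem.Dict.empty : PySem.Dict String Int)).getD e 0).toNat e := by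
  rw [pvCountsLoop_getD]
  simp [List.filter_beq]

-- ===== VERDICT (by name: the statement is the Claim_ definition above) =====
theorem applyComputationFilter_onValueArray_spec : Claim_equal_applyComputationFilter_onValueArray := by
  intro valueArray op v _ hpre
  unfold Spec_applyComputationFilter_onValueArray
  unfold applyComputationFilter_onValueArray applyComputationFilter_onValueArray_alt
  by_cases h1 : op = "Equal"
  · subst h1; rfl
  by_cases h2 : op = "Greater_than"
  · subst h2; rfl
  by_cases h3 : op = "Greater_than_or_equal"
  · subst h3; rfl
  by_cases h4 : op = "Less_than"
  · subst h4; rfl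
  by_cases h5 : op = "Less_than_or_equal"
  · subst h5; rfl
  by_cases h6 : op = "Unequal"
  · subst h6; rfl
  by_cases h7 : op = "Contains"
  · subst h7
    have hf : (fun (acc : List String) (e : String) => acc ++ valueArray.filter (fun item => item == e))
        = fun acc e => acc ++ List.replicate ((valueArray.foldl
            (fun d item => d.insert item (d.getD item 0 + 1))
            (PySem.Dict.empty : PySem.Dict String Int)).getD e 0).toNat e := by
      funext acc e
      rw [pvFilter_eq_replicate]
    exact congrArg some (congrArg
      (fun f => List.foldl f ([] : List String) (((PySem.Str.split? v ",").getD []).map PySem.Str.strip)) hf)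
  · -- unknown operator (and "Range", which Pre_ excludes): both ports return none
    simp [pvComparators, List.lookup, h7,
      beq_eq_false_iff_ne.mpr h1, beq_eq_false_iff_ne.mpr h2, beq_eq_false_iff_ne.mpr h3,
      beq_eq_false_iff_ne.mpr h4, beq_eq_false_iff_ne.mpr h5, beq_eq_false_iff_ne.mpr h6]
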